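-- pv_equiv track=rewrite | github.com/start555/Python_Learning | Kurs/Lesson4/9.4.py | func
-- ===== SOURCE A (Python) =====
-- def func(tpl, lst):
--     if len(tpl) == len(lst):
--         return dict(zip(tpl, lst))
--     elif len(lst) > len(tpl):
--         lst.pop()
--         return func(tpl, lst)
--     else:
--         new_lst = list(tpl)    # преобразуем кортеж к списку, чтобы можно было вызвать метод удаление .pop
--         new_lst.pop()
--         tpl = tuple(new_lst)   # преобразуем список назад к кортежу
--         return func(tpl, lst)
-- ===== SOURCE B (Python) =====
-- def func(tpl, lst):
--     # B: explicit loop instead of A's recursion; pops lst in place like A, then one zip (zip truncates to the shorter side).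
--     while len(lst) > len(tpl):
--         lst.pop()
--     return dict(zip(tpl, lst))
-- ===== Notes on version B (the rewrite author's own statement) =====
-- stated objective: simpler
-- what changed: Replaces A's tuple-rebuilding linear tail recursion with an explicit while-loop that pops lst in place, followed by a single dict(zip(...)) whose auto-truncation handles the longer-tuple case without rebuilding the tuple.
import Mathlib
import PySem

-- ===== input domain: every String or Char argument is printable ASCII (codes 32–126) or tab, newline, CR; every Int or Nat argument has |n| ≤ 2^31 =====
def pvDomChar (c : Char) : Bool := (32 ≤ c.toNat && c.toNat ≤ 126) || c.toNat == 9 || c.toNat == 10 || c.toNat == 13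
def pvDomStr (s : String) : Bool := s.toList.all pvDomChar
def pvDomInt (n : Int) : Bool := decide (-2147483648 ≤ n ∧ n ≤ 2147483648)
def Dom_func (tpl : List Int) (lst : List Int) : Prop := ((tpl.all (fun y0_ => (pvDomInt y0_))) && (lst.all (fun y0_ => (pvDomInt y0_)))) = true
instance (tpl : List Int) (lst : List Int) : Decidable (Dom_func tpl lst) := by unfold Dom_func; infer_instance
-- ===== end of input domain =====

-- B replaces A's tuple-rebuilding tail recursion with an in-place while-loop pop of lst plus one dict(zip(...)); objective: simpler.
-- Note: both A and B pop lst in place when len(lst) > len(tpl); the equivalence proved here is about the return value.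


-- ===== PORT A =====
-- A: compare lengths; pop the longer side (lst.pop() / rebuilt tuple) and recurse; dict(zip) when equal.
def func (tpl : List Int) (lst : List Int) : List (Int × Int) :=
  if tpl.length = lst.length then (PySem.Dict.ofList (tpl.zip lst)).items
  else if lst.length > tpl.length then func tpl lst.dropLast
  else func tpl.dropLast lst
termination_by tpl.length + lst.length
decreasing_by
  · have h2 : lst.dropLast.length = lst.length - 1 := List.length_dropLast
    omega
  · have h2 : tpl.dropLast.length = tpl.length - 1 := List.length_dropLast
    omega

-- ===== PORT B =====
-- B: while len(lst) > len(tpl): lst.pop()  — the loop, as structural recursion on lst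
def funcAltTrunc (tpl : List Int) (lst : List Int) : List Int :=
  if lst.length > tpl.length then funcAltTrunc tpl lst.dropLast else lst
termination_by lst.length
decreasing_by
  have h2 : lst.dropLast.length = lst.length - 1 := List.length_dropLast
  omega

-- B: dict(zip(tpl, lst)) after the loop; zip truncates to the shorter sequence
def func_alt (tpl : List Int) (lst : List Int) : List (Int × Int) :=
  (PySem.Dict.ofList (tpl.zip (funcAltTrunc tpl lst))).items

-- ===== PRECONDITION & SPEC =====
def Spec_func (tpl : List Int) (lst : List Int) (out : List (Int × Int)) : Prop := out = func_alt tpl lst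
instance (tpl : List Int) (lst : List Int) (out : List (Int × Int)) : Decidable (Spec_func tpl lst out) := by unfold Spec_func; infer_instance

-- ===== CLAIM (what is proved, stated in full; the proofs are below) =====
def Claim_equal_func : Prop := ∀ (tpl : List Int) (lst : List Int), Dom_func tpl lst → Spec_func tpl lst (func tpl lst)

-- ===== LEMMAS AND PROOFS =====

-- zip ignores elements of the longer list beyond the shorter one's length
theorem zip_take_right_of_le {α β : Type} (tpl : List α) (lst : List β) (n : Nat)
    (h : tpl.length ≤ n) : tpl.zip (lst.take n) = tpl.zip lst := by
  induction tpl generalizing lst n with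
  | nil => simp
  | cons a t ih =>
    cases lst with
    | nil => simp
    | cons b l =>
      cases n with
      | zero => simp at h
      | succ m =>
        simp only [List.take_succ_cons, List.zip_cons_cons]
        rw [ih l m (by simpa using h)]

theorem zip_dropLast_right {α β : Type} (tpl : List α) (lst : List β)
    (h : tpl.length < lst.length) : tpl.zip lst.dropLast = tpl.zip lst := by
  rw [List.dropLast_eq_take, zip_take_right_of_le tpl lst (lst.length - 1) (by omega)]

theorem zip_dropLast_left {α β : Type} (tpl : List α) (lst : List β)
    (h : lst.length < tpl.length) : tpl.dropLast.zip lst = tpl.zip lst := by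
  have := zip_dropLast_right lst tpl h
  calc tpl.dropLast.zip lst = (lst.zip tpl.dropLast).map Prod.swap := by
        rw [List.zip_swap]
    _ = (lst.zip tpl).map Prod.swap := by rw [this]
    _ = tpl.zip lst := by simp

theorem func_eq_zip (tpl : List Int) (lst : List Int) :
    func tpl lst = (PySem.Dict.ofList (tpl.zip lst)).items := by
  fun_induction func tpl lst with
  | case1 tpl lst h => rfl
  | case2 tpl lst h1 h2 ih => rw [ih, zip_dropLast_right tpl lst (by omega)]
  | case3 tpl lst h1 h2 ih => rw [ih, zip_dropLast_left tpl lst (by omega)]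

theorem funcAltTrunc_zip (tpl : List Int) (lst : List Int) :
    tpl.zip (funcAltTrunc tpl lst) = tpl.zip lst := by
  fun_induction funcAltTrunc tpl lst with
  | case1 l hgt ih => rw [ih, zip_dropLast_right tpl l (by omega)]
  | case2 l hle => rfl

-- ===== VERDICT (by name: the statement is the Claim_ definition above) =====
theorem func_spec : Claim_equal_func := by
  intro tpl lst _
  unfold Spec_func func_alt
  rw [func_eq_zip, funcAltTrunc_zip]
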